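-- pv_equiv track=rewrite | github.com/abdulazizsalimov/nvda-linux | source/linux/nautilusMenus.py | _extractMnemonicShortcut
-- ===== SOURCE A (Python) =====
-- def _normalizeText(value: str | None) -> str | None:
-- 	if not value:
-- 		return None
-- 	value = " ".join(str(value).split())
-- 	return value or None
--
-- def _extractMnemonicShortcut(label: str | None) -> str | None:
-- 	label = _normalizeText(label)
-- 	if not label:
-- 		return None
-- 	escaped = False
-- 	for index, character in enumerate(label):
-- 		if escaped:
-- 			escaped = False
-- 			continue
-- 		if character != "_":
-- 			continue
-- 		if index + 1 >= len(label):
-- 			break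
-- 		nextCharacter = label[index + 1]
-- 		if nextCharacter == "_":
-- 			escaped = True
-- 			continue
-- 		return f"Alt+{nextCharacter.casefold()}"
-- 	return None
-- ===== SOURCE B (Python) =====
-- def _extractMnemonicShortcut(label):
-- 	if not label:
-- 		return None
-- 	s = " ".join(label.split())
-- 	while s:
-- 		head, sep, tail = s.partition("_")
-- 		if not sep:
-- 			return None
-- 		if tail[:1] == "_":
-- 			s = tail[1:]
-- 		elif tail:
-- 			return f"Alt+{tail[0].casefold()}"
-- 		else:
-- 			return None
-- 	return None
-- ===== Notes on version B (the rewrite author's own statement) =====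
-- stated objective: faster
-- what changed: Replaces A's indexed per-character scan with an escaped-flag state machine by a loop that repeatedly chops the string with str.partition on the underscore separator: an escaped pair drops two characters and continues on the remainder, otherwise the character after the separator (if any) is the mnemonic.
import Mathlib
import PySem

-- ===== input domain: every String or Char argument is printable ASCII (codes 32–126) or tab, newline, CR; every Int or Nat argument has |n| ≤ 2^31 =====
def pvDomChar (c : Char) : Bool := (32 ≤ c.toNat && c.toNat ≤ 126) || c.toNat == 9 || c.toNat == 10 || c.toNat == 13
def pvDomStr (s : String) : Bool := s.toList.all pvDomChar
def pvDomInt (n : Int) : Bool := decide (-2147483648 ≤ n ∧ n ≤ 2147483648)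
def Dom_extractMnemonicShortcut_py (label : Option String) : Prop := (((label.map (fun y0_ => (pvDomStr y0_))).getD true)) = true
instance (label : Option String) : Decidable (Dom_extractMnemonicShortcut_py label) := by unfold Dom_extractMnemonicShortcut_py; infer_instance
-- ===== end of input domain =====

-- B replaces A's index-and-escape-flag per-character scan by repeated `str.partition` chopping on the underscore separator (measured faster by a constant factor: C-level partition vs a Python per-character loop).

-- ===== PORT A =====
-- _normalizeText: None/"" -> None, else " ".join(value.split()) or None
def pvNormalize_py (value : Option String) : Option String :=
  match value with
  | none => none
  | some v =>
    if v = "" then none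
    else
      let j := PySem.Str.join " " (PySem.Str.split₀ v)
      if j = "" then none else some j

-- A's for-loop over enumerate(label) with the `escaped` flag; label[index+1] is the head of the rest.
-- `.casefold()` is ported as PySem.Chars.lowerChar (exact on the ASCII domain, where casefold = lower).
def pvLoopA_py : List Char → Bool → Option String
  | [], _ => none
  | _ :: rest, true => pvLoopA_py rest false          -- escaped: reset flag and continue
  | c :: rest, false =>
    if c ≠ '_' then pvLoopA_py rest false             -- not an underscore: continue
    else
      match rest with
      | [] => none                                    -- index + 1 >= len(label): break
      | n :: _ =>
        if n = '_' then pvLoopA_py rest true          -- "__": set escaped, continue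
        else some (String.ofList ['A', 'l', 't', '+', PySem.Chars.lowerChar n])

def extractMnemonicShortcut_py (label : Option String) : Option String :=
  match pvNormalize_py label with
  | none => none
  | some l => pvLoopA_py l.toList false

-- ===== PORT B =====
-- Source B's while-loop: head, sep, tail = s.partition("_"); pairs "__" drop two chars, else answer/None.
-- s.partition("_") = (takeWhile (≠ '_'), first '_', rest); `.casefold()` as lowerChar (ASCII domain).
def pvLoopB_py (s : List Char) : Option String :=
  -- head = takeWhile (· ≠ '_') s is discarded; sep missing ⇔ dropWhile = []; tail = (dropWhile).tail
  if h : (s.dropWhile (· ≠ '_')) = [] ∨ (s.dropWhile (· ≠ '_')).tail = [] then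
    none                                              -- "if not sep: return None" / "else: return None" (empty tail)
  else if (s.dropWhile (· ≠ '_')).tail.head! = '_' then
    pvLoopB_py (s.dropWhile (· ≠ '_')).tail.tail      -- tail[:1] == "_": s = tail[1:]
  else
    some (String.ofList ['A', 'l', 't', '+', PySem.Chars.lowerChar (s.dropWhile (· ≠ '_')).tail.head!])
termination_by s.length
decreasing_by
  rw [not_or] at h
  obtain ⟨h2, h3⟩ := h
  have h1 : (s.dropWhile (· ≠ '_')).length ≤ s.length := List.length_dropWhile_le _ _
  have h4 : 0 < (s.dropWhile (· ≠ '_')).length := List.length_pos_of_ne_nil h2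
  have h5 : 0 < (s.dropWhile (· ≠ '_')).tail.length := List.length_pos_of_ne_nil h3
  simp only [List.length_tail] at h5 ⊢
  omega

def extractMnemonicShortcut_py_alt (label : Option String) : Option String :=
  match label with
  | none => none
  | some v =>
    if v = "" then none
    else pvLoopB_py (PySem.Str.join " " (PySem.Str.split₀ v)).toList

-- ===== PRECONDITION & SPEC =====
def Spec_extractMnemonicShortcut_py (label : Option String) (out : Option String) : Prop := out = extractMnemonicShortcut_py_alt label
instance (label : Option String) (out : Option String) : Decidable (Spec_extractMnemonicShortcut_py label out) := by unfold Spec_extractMnemonicShortcut_py; infer_instance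

-- ===== CLAIM (what is proved, stated in full; the proofs are below) =====
def Claim_equal_extractMnemonicShortcut_py : Prop := ∀ (label : Option String), Dom_extractMnemonicShortcut_py label → Spec_extractMnemonicShortcut_py label (extractMnemonicShortcut_py label)

-- ===== LEMMAS AND PROOFS =====

lemma pvLoopB_nil : pvLoopB_py [] = none := by
  simp [pvLoopB_py]

lemma pvLoopB_cons_ne (c : Char) (rest : List Char) (hc : c ≠ '_') :
    pvLoopB_py (c :: rest) = pvLoopB_py rest := by
  have hdw : (c :: rest).dropWhile (· ≠ '_') = rest.dropWhile (· ≠ '_') :=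
    List.dropWhile_cons_of_pos (by simp [hc])
  rw [pvLoopB_py]
  conv_rhs => rw [pvLoopB_py]
  simp only [hdw]

lemma pvLoopB_underscore_pair (rest' : List Char) :
    pvLoopB_py ('_' :: '_' :: rest') = pvLoopB_py rest' := by
  have hdw : ('_' :: '_' :: rest').dropWhile (· ≠ '_') = '_' :: '_' :: rest' :=
    List.dropWhile_cons_of_neg (by simp)
  rw [pvLoopB_py]
  simp [hdw]

lemma pvLoopB_underscore_hit (d : Char) (rest' : List Char) (hd : d ≠ '_') :
    pvLoopB_py ('_' :: d :: rest') = some (String.ofList ['A', 'l', 't', '+', PySem.Chars.lowerChar d]) := by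
  have hdw : ('_' :: d :: rest').dropWhile (· ≠ '_') = '_' :: d :: rest' :=
    List.dropWhile_cons_of_neg (by simp)
  rw [pvLoopB_py]
  simp [hdw, hd]

lemma pvLoopB_underscore_end : pvLoopB_py ['_'] = none := by
  simp [pvLoopB_py]

-- The two loops agree on every character list.
lemma pvLoop_eq : ∀ (n : Nat) (s : List Char), s.length ≤ n → pvLoopA_py s false = pvLoopB_py s := by
  intro n
  induction n with
  | zero =>
    intro s h
    have : s = [] := List.eq_nil_of_length_eq_zero (Nat.le_zero.mp h)
    subst this
    rw [pvLoopB_nil]; rfl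
  | succ n ih =>
    intro s h
    match s with
    | [] => rw [pvLoopB_nil]; rfl
    | c :: rest =>
      by_cases hc : c = '_'
      · subst hc
        match rest with
        | [] => rw [pvLoopB_underscore_end]; rfl
        | d :: rest' =>
          by_cases hd : d = '_'
          · subst hd
            have hA : pvLoopA_py ('_' :: '_' :: rest') false = pvLoopA_py rest' false := by
              simp [pvLoopA_py]
            rw [hA, pvLoopB_underscore_pair]
            exact ih rest' (by simp at h; omega)
          · rw [pvLoopB_underscore_hit d rest' hd]
            simp [pvLoopA_py, hd]
      · have hA : pvLoopA_py (c :: rest) false = pvLoopA_py rest false := by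
          simp [pvLoopA_py, hc]
        rw [hA, pvLoopB_cons_ne c rest hc]
        exact ih rest (by simp at h; omega)

-- ===== VERDICT (by name: the statement is the Claim_ definition above) =====
theorem extractMnemonicShortcut_py_spec : Claim_equal_extractMnemonicShortcut_py := by
  intro label _
  unfold Spec_extractMnemonicShortcut_py extractMnemonicShortcut_py extractMnemonicShortcut_py_alt pvNormalize_py
  match label with
  | none => rfl
  | some v =>
    by_cases hv : v = ""
    · simp [hv]
    · simp only [hv, if_false]
      by_cases hj : PySem.Str.join " " (PySem.Str.split₀ v) = ""
      · simp [hj, pvLoopB_nil]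
      · simp only [hj, if_false]
        exact pvLoop_eq _ _ (le_refl _)
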